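-- pv_equiv track=rewrite | github.com/Hemisphere-Project/MillluBridge | Bridge/src/midi/input_manager.py | _decode_7bit
-- ===== SOURCE A (Python) =====
-- def _decode_7bit(encoded_data):
--     """Decode 7-bit MIDI format back to 8-bit data
--     Every 8 bytes of input becomes 7 bytes of output (MSBs unpacked from first byte)
--     """
--     decoded = []
--     idx = 0
--
--     while idx < len(encoded_data):
--         # Read MSB byte
--         msb_byte = encoded_data[idx]
--         idx += 1
--
--         # Decode up to 7 data bytes
--         chunk_size = min(7, len(encoded_data) - idx)
--         for i in range(chunk_size):
--             if idx >= len(encoded_data):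
--                 break
--             byte_val = encoded_data[idx]
--             idx += 1
--             # Restore MSB if it was set
--             if msb_byte & (1 << i):
--                 byte_val |= 0x80
--             decoded.append(byte_val)
--
--     return decoded
-- ===== SOURCE B (Python) =====
-- def _decode_7bit(encoded_data):
--     """Decode 7-bit MIDI format back to 8-bit data: one flat pass carrying the
--     current MSB byte and the position k within the current 8-byte group."""
--     decoded = []
--     msb = 0
--     k = 0
--     for byte in encoded_data:
--         if k == 0:
--             msb = byte
--         elif msb & (1 << (k - 1)):
--             decoded.append(byte | 0x80)
--         else:
--             decoded.append(byte)
--         k = (k + 1) % 8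
--     return decoded
-- ===== Notes on version B (the rewrite author's own statement) =====
-- stated objective: simpler
-- what changed: Replaced A's nested outer-while/inner-for over 8-byte groups (with explicit idx and chunk_size bookkeeping) by a single flat for-loop over the input that carries the current MSB byte and the position-in-group counter k = (k+1) % 8.
import Mathlib
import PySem

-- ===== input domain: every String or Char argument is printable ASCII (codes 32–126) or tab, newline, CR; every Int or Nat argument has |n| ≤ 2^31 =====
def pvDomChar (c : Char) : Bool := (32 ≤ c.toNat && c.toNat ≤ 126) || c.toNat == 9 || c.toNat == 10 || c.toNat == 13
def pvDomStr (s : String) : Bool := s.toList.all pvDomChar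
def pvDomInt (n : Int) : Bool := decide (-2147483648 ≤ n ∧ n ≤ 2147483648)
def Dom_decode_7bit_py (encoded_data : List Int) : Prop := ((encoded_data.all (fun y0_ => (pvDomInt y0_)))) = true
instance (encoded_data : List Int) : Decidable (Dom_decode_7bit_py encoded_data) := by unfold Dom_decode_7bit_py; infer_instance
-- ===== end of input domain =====

-- B replaces A's nested outer-while/inner-for group decoding by one flat pass
-- carrying the current MSB byte and the position within the 8-byte group (objective: simpler).


-- ===== PORT A =====
-- Inner for-loop of A: consumes up to 7 data bytes (i = loop counter), returns the
-- decoded chunk and the remaining input (A's idx advance).  'chunk_size = min(7, len-idx)'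
-- together with the (dead) 'idx >= len' break is exactly: stop at i = 7 or at end of input.
-- '1 << i' is ported as (2:Int)^i (exact); truthiness of 'msb & (1<<i)' is ≠ 0.
def aInner (msb : Int) (i : Nat) : List Int → List Int × List Int
  | [] => ([], [])
  | b :: rest =>
    if 7 ≤ i then ([], b :: rest)
    else
      let v := if PySem.Int.band msb ((2:Int) ^ i) ≠ 0 then PySem.Int.bor b 128 else b
      let p := aInner msb (i + 1) rest
      (v :: p.1, p.2)

-- termination lemma for the outer while-loop (cited by decreasing_by below)
theorem aInner_rest_le (msb : Int) (i : Nat) (xs : List Int) :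
    (aInner msb i xs).2.length ≤ xs.length := by
  induction xs generalizing i with
  | nil => simp [aInner]
  | cons b rest ih =>
    simp only [aInner]
    split
    · simp
    · simpa using Nat.le_succ_of_le (ih (i + 1))

-- Outer while-loop of A: read the MSB byte, decode the chunk, continue on the rest.
def decode_7bit_py (encoded_data : List Int) : List Int :=
  match encoded_data with
  | [] => []
  | msb :: rest =>
    let p := aInner msb 0 rest
    p.1 ++ decode_7bit_py p.2
termination_by encoded_data.length
decreasing_by
  simpa using Nat.lt_succ_of_le (aInner_rest_le msb 0 rest)

-- ===== PORT B =====
-- B's single for-loop: state is (decoded, msb, k); k = position within the 8-byte group.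
def bLoop (decoded : List Int) (msb : Int) (k : Nat) : List Int → List Int
  | [] => decoded
  | b :: rest =>
    if k = 0 then bLoop decoded b ((k + 1) % 8) rest
    else if PySem.Int.band msb ((2:Int) ^ (k - 1)) ≠ 0 then
      bLoop (decoded ++ [PySem.Int.bor b 128]) msb ((k + 1) % 8) rest
    else bLoop (decoded ++ [b]) msb ((k + 1) % 8) rest

def decode_7bit_py_alt (encoded_data : List Int) : List Int :=
  bLoop [] 0 0 encoded_data

-- ===== PRECONDITION & SPEC =====
def Spec_decode_7bit_py (encoded_data : List Int) (out : List Int) : Prop := out = decode_7bit_py_alt encoded_data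
instance (encoded_data : List Int) (out : List Int) : Decidable (Spec_decode_7bit_py encoded_data out) := by unfold Spec_decode_7bit_py; infer_instance

-- ===== CLAIM (what is proved, stated in full; the proofs are below) =====
def Claim_equal_decode_7bit_py : Prop := ∀ (encoded_data : List Int), Dom_decode_7bit_py encoded_data → Spec_decode_7bit_py encoded_data (decode_7bit_py encoded_data)

-- ===== LEMMAS AND PROOFS =====

-- the accumulator of bLoop factors out
theorem bLoop_acc (xs : List Int) : ∀ (acc : List Int) (msb : Int) (k : Nat),
    bLoop acc msb k xs = acc ++ bLoop [] msb k xs := by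
  induction xs with
  | nil => intro acc msb k; simp [bLoop]
  | cons b rest ih =>
    intro acc msb k
    simp only [bLoop]
    split
    · exact ih acc b _
    · split
      · rw [ih (acc ++ _), ih ([] ++ _)]; simp
      · rw [ih (acc ++ _), ih ([] ++ _)]; simp

-- A's inner loop at i = 7 consumes nothing
theorem aInner_stop (msb : Int) (xs : List Int) : aInner msb 7 xs = ([], xs) := by
  cases xs <;> simp [aInner]

-- B inside a group (position i+1, i < 7) matches A's inner chunk followed by the rest,
-- given the outer induction hypothesis for shorter inputs.
theorem inner_eq (n : Nat)
    (outIH : ∀ ys : List Int, ys.length ≤ n → ∀ m : Int, bLoop [] m 0 ys = decode_7bit_py ys) :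
    ∀ (rest : List Int), rest.length ≤ n → ∀ (msb : Int) (i : Nat), i < 7 →
      bLoop [] msb (i + 1) rest =
        (aInner msb i rest).1 ++ decode_7bit_py (aInner msb i rest).2 := by
  intro rest
  induction rest generalizing n with
  | nil =>
    intro _ msb i hi
    simp [bLoop, aInner, decode_7bit_py]
  | cons b rest ih =>
    intro hlen msb i hi
    have hk : ¬ (i + 1 = 0) := by omega
    have hi' : ¬ 7 ≤ i := Nat.not_le.mpr hi
    have hrest : rest.length ≤ n := by simpa using Nat.le_of_succ_le hlen
    simp only [bLoop, aInner, hk, hi', if_false, Nat.add_sub_cancel, bLoop_acc _ ([] ++ _)]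
    rcases Nat.lt_or_ge i 6 with h6 | h6
    · have hmod : (i + 1 + 1) % 8 = (i + 1) + 1 := by omega
      rw [hmod, ih n outIH hrest msb (i + 1) (by omega)]
      split_ifs <;> simp
    · have h : i = 6 := by omega
      subst h
      rw [show (6 + 1 + 1) % 8 = 0 from rfl, outIH rest hrest msb, aInner_stop]
      split_ifs <;> simp

theorem main_eq : ∀ (n : Nat) (xs : List Int), xs.length ≤ n → ∀ (m : Int),
    bLoop [] m 0 xs = decode_7bit_py xs := by
  intro n
  induction n with
  | zero =>
    intro xs hxs m
    have : xs = [] := List.eq_nil_of_length_eq_zero (Nat.le_zero.mp hxs)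
    subst this; simp [bLoop, decode_7bit_py]
  | succ n ih =>
    intro xs hxs m
    cases xs with
    | nil => simp [bLoop, decode_7bit_py]
    | cons msb rest =>
      have hrest : rest.length ≤ n := by simpa using Nat.le_of_succ_le_succ hxs
      simp only [bLoop, decode_7bit_py]
      rw [show (0 + 1) % 8 = 0 + 1 from rfl]
      exact inner_eq n ih rest hrest msb 0 (by omega)

-- ===== VERDICT (by name: the statement is the Claim_ definition above) =====
theorem decode_7bit_py_spec : Claim_equal_decode_7bit_py := by
  intro xs _
  unfold Spec_decode_7bit_py decode_7bit_py_alt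
  exact (main_eq xs.length xs le_rfl 0).symm
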